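-- pv_equiv track=rewrite | github.com/FAxel79/less1 | main1.py | counN
-- ===== SOURCE A (Python) =====
-- def counN (inp,inn):
--     nnom = []
--     outp = inp.count(inn)
--     if not outp:
--         outp =0
--     nnom.append(outp)
--     j = 0
--     if isinstance(inp, list):
--         for i in range (outp):
--             k = inp.index(inn,j)
--             nnom.append(k)
--             j = k+1
--     return nnom
-- ===== SOURCE B (Python) =====
-- def counN(inp, inn):
--     if not isinstance(inp, list):
--         return [inp.count(inn)]
--     idxs = [i for i, x in enumerate(inp) if x is inn or x == inn]
--     return [len(idxs)] + idxs
-- ===== Notes on version B (the rewrite author's own statement) =====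
-- stated objective: simpler
-- what changed: Replaces the count-then-repeated-index(inn,j) cursor loop with a single enumerate pass that collects matching indices and takes the count as their length.
import Mathlib
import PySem

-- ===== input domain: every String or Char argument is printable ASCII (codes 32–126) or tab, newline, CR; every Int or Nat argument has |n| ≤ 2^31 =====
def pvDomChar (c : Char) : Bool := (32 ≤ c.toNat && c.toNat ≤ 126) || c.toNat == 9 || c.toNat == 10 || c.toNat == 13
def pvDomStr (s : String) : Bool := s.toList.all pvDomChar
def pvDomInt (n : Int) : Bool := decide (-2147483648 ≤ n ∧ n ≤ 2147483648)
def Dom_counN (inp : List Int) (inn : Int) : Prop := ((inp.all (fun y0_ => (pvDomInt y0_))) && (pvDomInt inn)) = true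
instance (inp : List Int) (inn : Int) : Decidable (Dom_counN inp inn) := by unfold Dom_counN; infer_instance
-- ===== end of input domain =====

-- B replaces A's count-then-cursor inp.index(inn, j) loop by a single enumerate pass (simpler).

-- ===== PORT A =====
-- the for-loop: `fuel` iterations remain; `inp.index(inn, j)` is ported as a search in
-- `inp.drop j` (first match at offset k' means Python's index returns j + k');
-- `index? = none` is Python's ValueError, unreachable here because fuel = remaining matches
def counNLoop (inp : List Int) (inn : Int) (fuel : Nat) (j : Nat) (acc : List Int) : List Int :=
  match fuel with
  | 0 => acc
  | n + 1 =>
    match PySem.List.index? (inp.drop j) inn with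
    | none => acc
    | some k' => counNLoop inp inn n (j + k' + 1) (acc ++ [((j + k' : Nat) : Int)])

def counN (inp : List Int) (inn : Int) : List Int :=
  let outp : Nat := PySem.List.count inp inn
  -- `if not outp: outp = 0` is a no-op on an int count
  counNLoop inp inn outp 0 [(outp : Int)]

-- ===== PORT B =====
def counN_alt (inp : List Int) (inn : Int) : List Int :=
  let idxs : List Int := ((PySem.List.enumerate inp).filter (fun p => p.2 == inn)).map (fun p => p.1)
  (idxs.length : Int) :: idxs

-- ===== PRECONDITION & SPEC =====
def Spec_counN (inp : List Int) (inn : Int) (out : List Int) : Prop := out = counN_alt inp inn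
instance (inp : List Int) (inn : Int) (out : List Int) : Decidable (Spec_counN inp inn out) := by unfold Spec_counN; infer_instance

-- ===== CLAIM (what is proved, stated in full; the proofs are below) =====
def Claim_equal_counN : Prop := ∀ (inp : List Int) (inn : Int), Dom_counN inp inn → Spec_counN inp inn (counN inp inn)

-- ===== LEMMAS AND PROOFS =====

-- reference list of matching indices starting at offset j
def matchIdx (xs : List Int) (inn : Int) (j : Int) : List Int :=
  match xs with
  | [] => []
  | x :: r => if x == inn then j :: matchIdx r inn (j + 1) else matchIdx r inn (j + 1)

theorem matchIdx_length (xs : List Int) (inn : Int) (j : Int) :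
    (matchIdx xs inn j).length = xs.count inn := by
  induction xs generalizing j with
  | nil => simp [matchIdx]
  | cons x r ih =>
    by_cases hx : x = inn <;> simp [matchIdx, hx, ih]

theorem enumerate_filter_eq_matchIdx (xs : List Int) (inn : Int) (s : Int) :
    ((PySem.List.enumerate xs s).filter (fun p => p.2 == inn)).map (fun p => p.1)
      = matchIdx xs inn s := by
  induction xs generalizing s with
  | nil => simp [PySem.List.enumerate_nil, matchIdx]
  | cons x r ih =>
    by_cases hx : x = inn <;>
      simp [PySem.List.enumerate_cons, matchIdx, hx, ih]

-- when the element at the cursor does not match, advancing the cursor changes nothing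
theorem counNLoop_skip (inp : List Int) (inn : Int) (j : Nat) (x : Int) (rest : List Int)
    (hd : inp.drop j = x :: rest) (hx : x ≠ inn) (fuel : Nat) (acc : List Int) :
    counNLoop inp inn fuel j acc = counNLoop inp inn fuel (j + 1) acc := by
  have hd1 : inp.drop (j + 1) = rest := by
    rw [← List.tail_drop, hd, List.tail_cons]
  cases fuel with
  | zero => simp [counNLoop]
  | succ n =>
    rw [counNLoop, counNLoop, hd, hd1,
        PySem.List.index?_cons_of_ne rest hx]
    cases h : PySem.List.index? rest inn with
    | none => simp
    | some k' =>
      simp only [Option.map_some]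
      have h1 : j + (k' + 1) + 1 = j + 1 + k' + 1 := by omega
      have h2 : j + (k' + 1) = j + 1 + k' := by omega
      rw [h1, h2]

theorem counNLoop_eq (tail : List Int) (inp : List Int) (inn : Int) (j : Nat) (acc : List Int)
    (hd : inp.drop j = tail) :
    counNLoop inp inn (tail.count inn) j acc = acc ++ matchIdx tail inn (j : Int) := by
  induction tail generalizing j acc with
  | nil => simp [counNLoop, matchIdx]
  | cons x rest ih =>
    have hd1 : inp.drop (j + 1) = rest := by
      rw [← List.tail_drop, hd, List.tail_cons]
    by_cases hx : x = inn
    · subst hx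
      rw [List.count_cons_self, counNLoop, hd, PySem.List.index?_cons_self]
      have := ih (j + 1) (acc ++ [(j : Int)]) hd1
      simp only [Nat.add_zero] at *
      rw [this]
      simp [matchIdx, List.append_assoc]
    · rw [List.count_cons_of_ne hx, counNLoop_skip inp inn j x rest hd hx,
          ih (j + 1) acc hd1]
      simp [matchIdx, hx]

-- ===== VERDICT (by name: the statement is the Claim_ definition above) =====
theorem counN_spec : Claim_equal_counN := by
  intro inp inn _
  unfold Spec_counN
  simp only [counN, counN_alt, enumerate_filter_eq_matchIdx, matchIdx_length,
    PySem.List.count_eq]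
  have := counNLoop_eq inp inp inn 0 [((List.count inn inp : Nat) : Int)] (by simp)
  simp only [Nat.cast_zero] at this
  rw [this]
  simp
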